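-- pv_equiv track=rewrite | github.com/maltepoo/algorithm | 프로그래머스/lv2/131704. 택배상자/택배상자.py | solution
-- ===== SOURCE A (Python) =====
-- def solution(order):
--     belt = []
--
--     n, i = 1, 0
--     while n < len(order) + 1:
--         belt.append(n)
--         while belt[-1] == order[i]:
--             belt.pop()
--             i += 1
--
--             if len(belt) == 0:
--                 break
--         n += 1
--     return i
-- ===== SOURCE B (Python) =====
-- def solution(order):
--     n = len(order)
--     belt = []
--     nxt = 1
--     i = 0
--     for t in order:
--         while nxt <= t and nxt <= n:
--             belt.append(nxt)
--             nxt += 1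
--         if belt and belt[-1] == t:
--             belt.pop()
--             i += 1
--         else:
--             break
--     return i
-- ===== Notes on version B (the rewrite author's own statement) =====
-- stated objective: alternative
-- what changed: B inverts A's loop nesting: instead of iterating over box numbers 1..n and greedily popping matches of the request pointer, B iterates over the requested order itself, pushing boxes onto the belt on demand up to the current target and breaking at the first unservable target.
import Mathlib
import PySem

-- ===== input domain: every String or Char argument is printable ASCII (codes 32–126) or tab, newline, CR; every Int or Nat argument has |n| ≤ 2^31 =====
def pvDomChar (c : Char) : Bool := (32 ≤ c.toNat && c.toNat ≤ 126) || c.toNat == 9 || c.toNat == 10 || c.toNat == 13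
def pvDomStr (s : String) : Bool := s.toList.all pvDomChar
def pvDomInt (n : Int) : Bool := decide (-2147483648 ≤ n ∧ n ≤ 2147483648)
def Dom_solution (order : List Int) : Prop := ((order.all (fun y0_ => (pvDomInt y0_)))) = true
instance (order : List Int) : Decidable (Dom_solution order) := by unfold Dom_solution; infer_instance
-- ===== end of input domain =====

-- B inverts A's loop nesting: it iterates over the requested order and pushes boxes on demand
-- (objective: alternative decomposition, same linear-in-pushes cost); A = B is proved on all inputs.

-- ===== PORT A =====
-- belt is a Lean list with head = top of the Python stack (append → cons, belt[-1] → head, pop → tail).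
-- inner `while belt[-1] == order[i]` loop of A; a `none` from order[i] (IndexError, unreachable from
-- A's entry states, where i = len(order) forces an empty belt) exits the loop.
def popA (order : List Int) : List Int → Int → List Int × Int
  | [], i => ([], i)
  | b :: bs, i =>
    match PySem.List.pyGet? order i with
    | none => (b :: bs, i)
    | some t =>
      if b = t then
        match bs with
        | [] => ([], i + 1)            -- `if len(belt) == 0: break`
        | b' :: bs' => popA order (b' :: bs') (i + 1)
      else (b :: bs, i)

-- outer `while n < len(order) + 1` loop of A
def loopA (order : List Int) (n : Int) (belt : List Int) (i : Int) : Int :=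
  if _h : n < (order.length : Int) + 1 then
    let s := popA order (n :: belt) i
    loopA order (n + 1) s.1 s.2
  else i
termination_by ((order.length : Int) + 1 - n).toNat
decreasing_by omega

def solution (order : List Int) : Int := loopA order 1 [] 0

-- ===== PORT B =====
-- `while nxt <= t and nxt <= n` push loop of B; returns (belt, nxt)
def pushB (N : Int) (nxt t : Int) (belt : List Int) : List Int × Int :=
  if _h : nxt ≤ t ∧ nxt ≤ N then pushB N (nxt + 1) t (nxt :: belt) else (belt, nxt)
termination_by (t + 1 - nxt).toNat
decreasing_by omega

-- `for t in order` loop of B; `break` becomes returning 0, `i += 1` becomes `1 + …`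
def goB (N : Int) : List Int → Int → List Int → Int
  | [], _, _ => 0
  | t :: rest, nxt, belt =>
    let s := pushB N nxt t belt
    match s.1 with
    | b :: bs => if b = t then 1 + goB N rest s.2 bs else 0
    | [] => 0

def solution_alt (order : List Int) : Int := goB (order.length : Int) order 1 []

-- ===== PRECONDITION & SPEC =====
def Spec_solution (order : List Int) (out : Int) : Prop := out = solution_alt order
instance (order : List Int) (out : Int) : Decidable (Spec_solution order out) := by unfold Spec_solution; infer_instance

-- ===== CLAIM (what is proved, stated in full; the proofs are below) =====
def Claim_equal_solution : Prop := ∀ (order : List Int), Dom_solution order → Spec_solution order (solution order)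

-- ===== LEMMAS AND PROOFS =====

-- small-step equations for popA
theorem popA_none (order : List Int) (i : Int) (h : PySem.List.pyGet? order i = none)
    (b : Int) (bs : List Int) : popA order (b :: bs) i = (b :: bs, i) := by
  rw [popA.eq_def]; simp [h]

theorem popA_mismatch (order : List Int) (i t : Int) (h : PySem.List.pyGet? order i = some t)
    (b : Int) (bs : List Int) (hne : b ≠ t) : popA order (b :: bs) i = (b :: bs, i) := by
  rw [popA.eq_def]; simp [h, hne]

theorem popA_match (order : List Int) (i t : Int) (h : PySem.List.pyGet? order i = some t)
    (bs : List Int) : popA order (t :: bs) i = popA order bs (i + 1) := by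
  rw [popA.eq_def]; cases bs <;> simp [h, popA]

-- once i = len(order), order[i] is out of range and popA never pops
theorem popA_out_of_range (order belt : List Int) :
    popA order belt (order.length : Int) = (belt, (order.length : Int)) := by
  cases belt with
  | nil => rfl
  | cons b bs =>
    exact popA_none order _ (by simp [PySem.List.pyGet?_natCast]) b bs

-- once i = len(order), loopA keeps i fixed
theorem loopA_of_done (order : List Int) (n : Int) (belt : List Int) :
    loopA order n belt (order.length : Int) = (order.length : Int) := by
  by_cases h : n < (order.length : Int) + 1
  · rw [loopA]
    simp only [h, dif_pos, popA_out_of_range]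
    exact loopA_of_done order (n + 1) (n :: belt)
  · rw [loopA]; simp [h]
termination_by ((order.length : Int) + 1 - n).toNat
decreasing_by omega

-- one unfolding of the push loop, and its stop case
theorem pushB_step (N nxt t : Int) (belt : List Int) (h1 : nxt ≤ t) (h2 : nxt ≤ N) :
    pushB N nxt t belt = pushB N (nxt + 1) t (nxt :: belt) := by
  rw [pushB]; simp [h1, h2]

theorem pushB_stop (N nxt t : Int) (belt : List Int) (h : ¬ (nxt ≤ t ∧ nxt ≤ N)) :
    pushB N nxt t belt = (belt, nxt) := by
  rw [pushB]; simp only [h, dite_false]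

-- one step of B's outer loop, written with the push loop's result explicit
theorem goB_cons (N t nxt : Int) (rest belt : List Int) :
    goB N (t :: rest) nxt belt =
      match (pushB N nxt t belt).1 with
      | b :: bs => if b = t then 1 + goB N rest (pushB N nxt t belt).2 bs else 0
      | [] => 0 := rfl

-- B breaks when no box can be pushed and the top (if any) is not the target
theorem goB_break (N t nxt : Int) (rest belt : List Int)
    (hpush : ¬ (nxt ≤ t ∧ nxt ≤ N))
    (htop : ∀ b bs, belt = b :: bs → b ≠ t) :
    goB N (t :: rest) nxt belt = 0 := by
  rw [goB_cons, pushB_stop N nxt t belt hpush]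
  cases belt with
  | nil => rfl
  | cons b bs => simp [htop b bs rfl]

-- B pops when no box can be pushed and the top is the target
theorem goB_pop (N t nxt : Int) (rest bs : List Int)
    (hpush : ¬ (nxt ≤ t ∧ nxt ≤ N)) :
    goB N (t :: rest) nxt (t :: bs) = 1 + goB N rest nxt bs := by
  rw [goB_cons, pushB_stop N nxt t _ hpush]
  simp

-- order[j] as the head of the dropped suffix
theorem pyGet?_drop (order : List Int) (j : Nat) (t : Int) (rest : List Int)
    (h : order.drop j = t :: rest) : PySem.List.pyGet? order (j : Int) = some t := by
  rw [PySem.List.pyGet?_natCast, ← List.head?_drop, h]; rfl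

-- the pop-phase bridge: continuing A's inner pop loop from a state whose belt lies below m
-- matches B's serving of the corresponding targets (ih is the outer strong-induction hypothesis)
theorem chain_lemma (order : List Int) (μ : Nat)
    (ih : ∀ (n : Int) (j : Nat) (belt : List Int),
      1 ≤ n → n ≤ (order.length : Int) + 1 → j ≤ order.length →
      (∀ b ∈ belt, b < n) →
      (∀ b bs t rest, belt = b :: bs → order.drop j = t :: rest → b ≠ t) →
      ((order.length : Int) + 1 - n).toNat + (order.length - j) ≤ μ →
      loopA order n belt (j : Int) = (j : Int) + goB (order.length : Int) (order.drop j) n belt) :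
    ∀ (belt : List Int) (m : Int) (j : Nat),
      1 ≤ m → m ≤ (order.length : Int) + 1 → j ≤ order.length →
      (∀ b ∈ belt, b < m) →
      ((order.length : Int) + 1 - m).toNat + (order.length - j) ≤ μ →
      loopA order m (popA order belt (j : Int)).1 ((popA order belt (j : Int)).2)
        = (j : Int) + goB (order.length : Int) (order.drop j) m belt := by
  intro belt
  induction belt with
  | nil =>
    intro m j h1 h2 h3 _ hmeas
    exact ih m j [] h1 h2 h3 (by simp) (by intro b bs t rest h; cases h) hmeas
  | cons b bs ihb =>
    intro m j h1 h2 h3 hbelt hmeas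
    by_cases hj : j = order.length
    · subst hj
      rw [popA_out_of_range, loopA_of_done, List.drop_length]
      simp [goB]
    · have hj' : j < order.length := lt_of_le_of_ne h3 hj
      obtain ⟨t, rest, hts⟩ : ∃ t rest, order.drop j = t :: rest := by
        have : order.drop j ≠ [] := by simp [List.drop_eq_nil_iff]; omega
        exact List.exists_cons_of_ne_nil this
      have hget := pyGet?_drop order j t rest hts
      have hrest : order.drop (j + 1) = rest := by
        rw [← List.tail_drop, hts]; rfl
      have hbm : b < m := hbelt b (List.mem_cons_self ..)
      by_cases hbt : b = t
      · subst hbt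
        rw [popA_match order _ b hget bs, hts,
            goB_pop _ b m rest bs (by omega)]
        have := ihb m (j + 1) (by omega) h2 (by omega)
          (fun x hx => hbelt x (List.mem_cons_of_mem _ hx)) (by omega)
        rw [hrest] at this
        push_cast at this ⊢
        rw [this]; ring
      · rw [popA_mismatch order _ t hget b bs hbt]
        exact ih m j (b :: bs) h1 h2 h3 hbelt
          (by intro b' bs' t' rest' hb hts'
              rw [hts] at hts'; cases hb; cases hts'; exact hbt)
          hmeas

-- main invariant: from an aligned state (all belt elements below n, top of belt ≠ next target),
-- the rest of A's outer loop serves exactly what B serves from the same state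
theorem main_lemma (order : List Int) (μ : Nat) :
    ∀ (n : Int) (j : Nat) (belt : List Int),
      1 ≤ n → n ≤ (order.length : Int) + 1 → j ≤ order.length →
      (∀ b ∈ belt, b < n) →
      (∀ b bs t rest, belt = b :: bs → order.drop j = t :: rest → b ≠ t) →
      ((order.length : Int) + 1 - n).toNat + (order.length - j) ≤ μ →
      loopA order n belt (j : Int) = (j : Int) + goB (order.length : Int) (order.drop j) n belt := by
  induction μ with
  | zero =>
    intro n j belt h1 h2 h3 _ _ hmeas
    have hj : j = order.length := by omega
    subst hj
    rw [loopA_of_done, List.drop_length]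
    simp [goB]
  | succ μ ih =>
    intro n j belt h1 h2 h3 hbelt halign hmeas
    by_cases hj : j = order.length
    · subst hj
      rw [loopA_of_done, List.drop_length]; simp [goB]
    · have hj' : j < order.length := lt_of_le_of_ne h3 hj
      obtain ⟨t, rest, hts⟩ : ∃ t rest, order.drop j = t :: rest := by
        have : order.drop j ≠ [] := by simp [List.drop_eq_nil_iff]; omega
        exact List.exists_cons_of_ne_nil this
      have hget := pyGet?_drop order j t rest hts
      have hrest : order.drop (j + 1) = rest := by
        rw [← List.tail_drop, hts]; rfl
      by_cases hn : n < (order.length : Int) + 1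
      · rw [loopA]
        simp only [hn, dif_pos]
        by_cases htn : t = n
        · -- the freshly pushed box n is the next target: A pops it at once, B pushes up to n and pops
          subst htn
          rw [popA_match order _ t hget belt]
          have hB : goB (order.length : Int) (order.drop j) t belt
              = 1 + goB (order.length : Int) rest (t + 1) belt := by
            rw [hts, goB_cons, pushB_step _ t t belt le_rfl (by omega),
                pushB_stop _ (t + 1) t _ (by omega)]
            simp
          rw [hB]
          have hchain := chain_lemma order μ ih belt (t + 1) (j + 1)
            (by omega) (by omega) (by omega)
            (fun b hb => by have := hbelt b hb; omega) (by omega)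
          rw [hrest] at hchain
          push_cast at hchain ⊢
          rw [hchain]; ring
        · -- top n ≠ target t: A just moves to the next box; B pushes n iff n ≤ t
          rw [popA_mismatch order _ t hget n belt (fun h => htn h.symm)]
          have hIH := ih (n + 1) j (n :: belt) (by omega) (by omega) h3
            (by intro b hb
                rcases List.mem_cons.mp hb with h | h
                · omega
                · have := hbelt b h; omega)
            (by intro b bs t' rest' hb hts'
                rw [hts] at hts'; cases hb; cases hts'
                exact fun h => htn h.symm)
            (by omega)
          rw [hIH, hts]
          by_cases htlt : t < n
          · -- t < n: no pushes on either side; both break (belt top ≠ t by alignment, and n ≠ t)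
            rw [goB_break _ t n rest belt (by omega)
                  (fun b bs hb => halign b bs t rest hb hts),
                goB_break _ t (n + 1) rest (n :: belt) (by omega)
                  (by intro b bs hb; cases hb; exact fun h => htn h.symm)]
          · -- t > n: B's push loop pushes n, reaching exactly A's (n+1, n::belt) state
            rw [goB_cons _ t n rest belt, pushB_step _ n t belt (by omega) (by omega),
                ← goB_cons]
      · -- n = len(order)+1: A's loop is over; B cannot push another box and breaks at once
        rw [loopA]
        simp only [hn, dif_neg, not_false_iff]
        rw [hts, goB_break _ t n rest belt (by omega)
              (fun b bs hb => halign b bs t rest hb hts)]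
        ring

-- ===== VERDICT (by name: the statement is the Claim_ definition above) =====
theorem solution_spec : Claim_equal_solution := by
  intro order _
  unfold Spec_solution solution solution_alt
  have h := main_lemma order (2 * order.length + 1) 1 0 [] (by omega) (by omega) (by omega)
    (by simp) (by intro b bs t rest h; cases h) (by omega)
  simpa using h
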